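-- pv_equiv track=rewrite | github.com/someflydev/agent-context-base | examples/canonical-faker/domain/generation_patterns.py | _slugify
-- ===== SOURCE A (Python) =====
-- def _slugify(value: str) -> str:
--     slug = []
--     last_dash = False
--     for char in value.lower():
--         if char.isalnum():
--             slug.append(char)
--             last_dash = False
--         elif not last_dash:
--             slug.append("-")
--             last_dash = True
--     return "".join(slug).strip("-") or "tenantcore"
-- ===== SOURCE B (Python) =====
-- def _slugify(value: str) -> str:
--     # Run-based decomposition: scan maximal runs of alnum / non-alnum characters
--     # with two index pointers instead of a per-character last_dash flag.
--     s = value.lower()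
--     n = len(s)
--     parts = []
--     i = 0
--     while i < n:
--         if s[i].isalnum():
--             j = i
--             while j < n and s[j].isalnum():
--                 j += 1
--             parts.append(s[i:j])
--             i = j
--         else:
--             while i < n and not s[i].isalnum():
--                 i += 1
--             parts.append("-")
--     return "".join(parts).strip("-") or "tenantcore"
-- ===== Notes on version B (the rewrite author's own statement) =====
-- stated objective: alternative
-- what changed: Replaces the per-character loop with a last_dash flag by a two-pointer scan over maximal alnum/non-alnum runs, emitting each alnum run whole and one dash per non-alnum run.
import Mathlib
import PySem

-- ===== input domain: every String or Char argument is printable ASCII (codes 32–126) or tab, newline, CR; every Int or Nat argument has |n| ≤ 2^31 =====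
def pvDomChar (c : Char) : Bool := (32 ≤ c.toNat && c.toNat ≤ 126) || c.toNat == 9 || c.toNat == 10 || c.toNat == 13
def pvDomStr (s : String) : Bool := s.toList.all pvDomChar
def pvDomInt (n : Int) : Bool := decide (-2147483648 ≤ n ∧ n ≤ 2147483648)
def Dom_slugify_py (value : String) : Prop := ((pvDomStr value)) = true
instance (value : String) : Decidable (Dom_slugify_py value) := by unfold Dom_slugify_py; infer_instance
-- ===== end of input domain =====

-- B collapses non-alnum runs by a two-pointer run scan instead of A's per-character last_dash flag.

-- ===== PORT A =====
-- one loop step: append char / append '-' once per non-alnum run, tracked by the flag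
def slugAStep (st : List Char × Bool) (c : Char) : List Char × Bool :=
  if PySem.Chars.isalnum c then (st.1 ++ [c], false)
  else if !st.2 then (st.1 ++ ['-'], true)
  else st

def slugify_py (value : String) : String :=
  let r := (PySem.Str.lower value).toList.foldl slugAStep ([], false)
  let slug := PySem.Chars.stripChars r.1 ['-']
  if slug = [] then "tenantcore" else String.ofList slug

-- ===== PORT B =====
-- the outer while-loop of Source B: one recursive call per maximal run
def slugRuns (cs : List Char) : List (List Char) :=
  match h : cs with
  | [] => []
  | c :: _ =>
    if PySem.Chars.isalnum c then
      cs.takeWhile PySem.Chars.isalnum :: slugRuns (cs.dropWhile PySem.Chars.isalnum)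
    else
      ['-'] :: slugRuns (cs.dropWhile (fun x => !PySem.Chars.isalnum x))
termination_by cs.length
decreasing_by
  · simp_all
    exact List.length_dropWhile_le _ _
  · simp_all
    exact List.length_dropWhile_le _ _

def slugify_py_alt (value : String) : String :=
  let parts := slugRuns (PySem.Str.lower value).toList
  let slug := PySem.Chars.stripChars (PySem.Chars.join [] parts) ['-']
  if slug = [] then "tenantcore" else String.ofList slug

-- ===== PRECONDITION & SPEC =====
def Spec_slugify_py (value : String) (out : String) : Prop := out = slugify_py_alt value
instance (value : String) (out : String) : Decidable (Spec_slugify_py value out) := by unfold Spec_slugify_py; infer_instance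

-- ===== CLAIM (what is proved, stated in full; the proofs are below) =====
def Claim_equal_slugify_py : Prop := ∀ (value : String), Dom_slugify_py value → Spec_slugify_py value (slugify_py value)

-- ===== LEMMAS AND PROOFS =====

lemma join_nil_eq_flatten (ps : List (List Char)) : PySem.Chars.join [] ps = ps.flatten := by
  simp [PySem.Chars.join, List.intercalate]
  induction ps with
  | nil => simp
  | cons p ps ih =>
    cases ps with
    | nil => simp
    | cons q qs => simp_all [List.intersperse]

lemma slug_fold_alnum (cs : List Char) : ∀ (acc : List Char) (b : Bool),
    cs.foldl slugAStep (acc, b)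
      = (cs.dropWhile PySem.Chars.isalnum).foldl slugAStep
          (acc ++ cs.takeWhile PySem.Chars.isalnum,
           if cs.takeWhile PySem.Chars.isalnum = [] then b else false) := by
  induction cs with
  | nil => simp
  | cons c tl ih =>
    intro acc b
    by_cases h : PySem.Chars.isalnum c
    · simp [List.takeWhile_cons, List.dropWhile_cons, h, List.foldl_cons, slugAStep, ih (acc ++ [c]) false]
    · simp [List.takeWhile_cons, List.dropWhile_cons, h]

lemma slug_fold_dash (cs : List Char) : ∀ (acc : List Char),
    cs.foldl slugAStep (acc, true)
      = (cs.dropWhile (fun x => !PySem.Chars.isalnum x)).foldl slugAStep (acc, true) := by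
  induction cs with
  | nil => simp
  | cons c tl ih =>
    intro acc
    by_cases h : PySem.Chars.isalnum c
    · simp [List.dropWhile_cons, h]
    · simp [List.dropWhile_cons, h, List.foldl_cons, slugAStep, ih acc]

lemma slug_fold_eq_runs (cs : List Char) : ∀ (acc : List Char),
    (cs.foldl slugAStep (acc, false)).1 = acc ++ (slugRuns cs).flatten := by
  induction cs using slugRuns.induct with
  | case1 => simp [slugRuns]
  | case2 c tl h ih =>
    intro acc
    rw [slug_fold_alnum]
    rw [slugRuns]
    simp only [List.takeWhile_cons, h, if_pos]
    simp only [List.takeWhile_cons, List.dropWhile_cons, h, if_pos, ite_true, reduceIte] at *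
    simp_all [List.flatten_cons]
  | case3 c tl h ih =>
    intro acc
    have hdw : List.dropWhile (fun x => !PySem.Chars.isalnum x) (c :: tl)
        = List.dropWhile (fun x => !PySem.Chars.isalnum x) tl := by
      simp [List.dropWhile_cons, h]
    rw [List.foldl_cons,
        show slugAStep (acc, false) c = (acc ++ ['-'], true) from by simp [slugAStep, h],
        slug_fold_dash, slugRuns]
    rw [if_neg h]
    rw [hdw] at ih ⊢
    cases hds : List.dropWhile (fun x => !PySem.Chars.isalnum x) tl with
    | nil => simp [hds, slugRuns]
    | cons d ds =>
      have hd : PySem.Chars.isalnum d = true := by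
        have := List.head_dropWhile_not (fun x => !PySem.Chars.isalnum x) (l := tl) (by simp [hds])
        simp [hds] at this; exact this
      rw [hds] at ih
      rw [List.foldl_cons,
          show slugAStep (acc ++ ['-'], true) d = slugAStep (acc ++ ['-'], false) d from by
            simp [slugAStep, hd]]
      have := ih (acc ++ ['-'])
      rw [List.foldl_cons] at this
      simp_all

-- ===== VERDICT (by name: the statement is the Claim_ definition above) =====
theorem slugify_py_spec : Claim_equal_slugify_py := by
  intro value _
  show _ = _
  simp only [slugify_py, slugify_py_alt, join_nil_eq_flatten]
  rw [slug_fold_eq_runs, List.nil_append]
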